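-- pv_equiv track=rewrite | github.com/gladysmae08/project-euler | problem11.py | rowProduct
-- ===== SOURCE A (Python) =====
-- def getProduct(input_block, start, stop):
--     product = 1
--     for i in input_block[start:stop]:
--         product *= int(i)
--     return product
--
-- def rowProduct(matrix, length):
--     maxProduct = 0
--     for row in matrix:
--         start = 0
--         while start + length <= len(row):
--             product = getProduct(row, start, start+length)
--             if product > maxProduct:
--                 maxProduct = product
--             start += 1
--     return maxProduct
-- ===== SOURCE B (Python) =====
-- def rowProduct(matrix, length):
--     if length < 0:
--         return 0
--     best = 0
--     for row in matrix:
--         n = len(row)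
--         if length > n:
--             continue
--         prod = 1
--         zeros = 0
--         for x in row[:length]:
--             if x == 0:
--                 zeros += 1
--             else:
--                 prod *= x
--         cand = prod if zeros == 0 else 0
--         if cand > best:
--             best = cand
--         for out, inc in zip(row, row[length:]):
--             if inc == 0:
--                 zeros += 1
--             else:
--                 prod *= inc
--             if out == 0:
--                 zeros -= 1
--             else:
--                 prod //= out
--             cand = prod if zeros == 0 else 0
--             if cand > best:
--                 best = cand
--     return best
-- ===== Notes on version B (the rewrite author's own statement) =====
-- stated objective: alternative
-- what changed: A recomputes each length-sized window product from scratch; B slides a window over each row keeping a running product of the nonzero window entries plus a zero count, doing O(1) multiplications/divisions per matrix element instead of one pass per window.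
-- intended difference: For a negative window length and a nonempty matrix A returns the maximum of the window products its Python negative-slice bounds accidentally produce (always >= 1, e.g. 1 on ([[2]], -1)), while B returns 0, the intended answer since no window of negative length exists. — e.g. on rowProduct([[2]], -1): A returns 1, B returns 0
import Mathlib
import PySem

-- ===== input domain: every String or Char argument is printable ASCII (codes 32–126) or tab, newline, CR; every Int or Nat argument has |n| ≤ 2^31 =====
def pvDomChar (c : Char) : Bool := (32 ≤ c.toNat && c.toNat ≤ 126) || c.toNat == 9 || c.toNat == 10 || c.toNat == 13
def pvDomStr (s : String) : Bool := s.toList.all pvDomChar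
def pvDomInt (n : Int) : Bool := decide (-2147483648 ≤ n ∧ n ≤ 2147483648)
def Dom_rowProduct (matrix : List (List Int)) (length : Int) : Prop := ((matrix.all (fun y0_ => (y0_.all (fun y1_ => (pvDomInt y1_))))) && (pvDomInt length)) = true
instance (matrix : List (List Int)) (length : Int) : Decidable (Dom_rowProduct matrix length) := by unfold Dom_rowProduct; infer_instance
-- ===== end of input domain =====

-- B replaces A's per-window product recomputation by a sliding window that keeps a running
-- product of the nonzero window entries plus a zero count (a different, one-pass-per-row algorithm).

-- ===== PORT A =====
def getProduct (inputBlock : List Int) (start stop : Int) : Int :=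
  (PySem.List.slice inputBlock (some start) (some stop)).foldl (fun product i => product * i) 1

-- the 'while start + length <= len(row)' loop; fuel = exact number of remaining iterations + slack
def rowProductLoop (row : List Int) (length : Int) : Nat → Int → Int → Int
  | 0, _, maxProduct => maxProduct
  | fuel + 1, start, maxProduct =>
    if start + length ≤ (row.length : Int) then
      rowProductLoop row length fuel (start + 1)
        (if getProduct row start (start + length) > maxProduct then
          getProduct row start (start + length) else maxProduct)
    else maxProduct

def rowProduct (matrix : List (List Int)) (length : Int) : Int :=
  matrix.foldl
    (fun maxProduct row =>
      rowProductLoop row length ((row.length : Int) - length + 1).toNat 0 maxProduct)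
    0

-- ===== PORT B =====
-- one step of the sliding loop: state (prod, zeros, best), pair (out, inc)
def slideStep (s : Int × Int × Int) (oi : Int × Int) : Int × Int × Int :=
  let s1 : Int × Int := if oi.2 = 0 then (s.1, s.2.1 + 1) else (s.1 * oi.2, s.2.1)
  let s2 : Int × Int := if oi.1 = 0 then (s1.1, s1.2 - 1) else (PySem.Int.floordiv s1.1 oi.1, s1.2)
  let cand : Int := if s2.2 = 0 then s2.1 else 0
  (s2.1, s2.2, if cand > s.2.2 then cand else s.2.2)

def rowProduct_alt (matrix : List (List Int)) (length : Int) : Int :=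
  if length < 0 then 0
  else
    matrix.foldl
      (fun best row =>
        if length > (row.length : Int) then best
        else
          let pz := (PySem.List.slice row none (some length)).foldl
            (fun (pz : Int × Int) x => if x = 0 then (pz.1, pz.2 + 1) else (pz.1 * x, pz.2)) (1, 0)
          let cand : Int := if pz.2 = 0 then pz.1 else 0
          let best1 : Int := if cand > best then cand else best
          ((row.zip (PySem.List.slice row (some length) none)).foldl slideStep
            (pz.1, pz.2, best1)).2.2)
      0

-- ===== PRECONDITION & SPEC =====
-- On a negative window length A's slices pick up Python's negative-slice-bound semantics and A
-- returns the maximum of those accidental window products (at least 1 for a nonempty matrix),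
-- while B returns 0, the intended answer when no window of the requested length exists.
def D_rowProduct (matrix : List (List Int)) (length : Int) : Prop :=
  length < 0 ∧ matrix ≠ []
instance (matrix : List (List Int)) (length : Int) : Decidable (D_rowProduct matrix length) := by
  unfold D_rowProduct; infer_instance

def Spec_rowProduct (matrix : List (List Int)) (length : Int) (out : Int) : Prop :=
  ¬ D_rowProduct matrix length → out = rowProduct_alt matrix length
instance (matrix : List (List Int)) (length : Int) (out : Int) : Decidable (Spec_rowProduct matrix length out) := by unfold Spec_rowProduct; infer_instance

def pvDiffWitness_rowProduct : List (List Int) × Int := ([[2]], -1)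
def pvDiffWitnessOut_rowProduct : Int × Int := (1, 0)

-- ===== CLAIM (what is proved, stated in full; the proofs are below) =====
def Claim_unchanged_rowProduct : Prop := ∀ (matrix : List (List Int)) (length : Int), Dom_rowProduct matrix length → Spec_rowProduct matrix length (rowProduct matrix length)
def Claim_changed_rowProduct : Prop := Dom_rowProduct (pvDiffWitness_rowProduct.1) (pvDiffWitness_rowProduct.2) ∧ D_rowProduct (pvDiffWitness_rowProduct.1) (pvDiffWitness_rowProduct.2) ∧ rowProduct (pvDiffWitness_rowProduct.1) (pvDiffWitness_rowProduct.2) = pvDiffWitnessOut_rowProduct.1 ∧ rowProduct_alt (pvDiffWitness_rowProduct.1) (pvDiffWitness_rowProduct.2) = pvDiffWitnessOut_rowProduct.2 ∧ pvDiffWitnessOut_rowProduct.1 ≠ pvDiffWitnessOut_rowProduct.2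
def Claim_exact_rowProduct : Prop := ∀ (matrix : List (List Int)) (length : Int), Dom_rowProduct matrix length → D_rowProduct matrix length → rowProduct matrix length ≠ rowProduct_alt matrix length

-- ===== LEMMAS AND PROOFS =====

-- reference quantities about a window
def listProd : List Int → Int
  | [] => 1
  | x :: t => x * listProd t

def nzProd : List Int → Int
  | [] => 1
  | x :: t => if x = 0 then nzProd t else x * nzProd t

def zCount : List Int → Int
  | [] => 0
  | x :: t => if x = 0 then zCount t + 1 else zCount t

-- common intermediate: structural slide over (window, remaining), folding max of window products
def goC : List Int → List Int → Int → Int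
  | _, [], best => best
  | w, i :: rest, best => goC (w.tail ++ [i]) rest (max best (listProd (w.tail ++ [i])))

theorem ifmax (p m : Int) : (if p > m then p else m) = max m p := by
  by_cases h : p > m <;> simp [h, max_def] <;> omega

theorem foldl_mul_eq (w : List Int) : ∀ a : Int, w.foldl (fun p x => p * x) a = a * listProd w := by
  induction w with
  | nil => intro a; simp [listProd]
  | cons x t ih => intro a; simp [List.foldl, listProd, ih, mul_comm, mul_left_comm]

theorem zCount_nonneg (t : List Int) : 0 ≤ zCount t := by
  induction t with
  | nil => simp [zCount]
  | cons y s ih => by_cases hy : y = 0 <;> simp [zCount, hy] <;> omega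

theorem listProd_eq (w : List Int) : listProd w = if zCount w = 0 then nzProd w else 0 := by
  induction w with
  | nil => simp [listProd, nzProd, zCount]
  | cons x t ih =>
    have hz := zCount_nonneg t
    by_cases hx : x = 0
    · simp [listProd, zCount, hx]
      intro h; omega
    · by_cases hz0 : zCount t = 0 <;> simp [listProd, nzProd, zCount, hx, hz0, ih]

theorem nzProd_append (t : List Int) (i : Int) :
    nzProd (t ++ [i]) = if i = 0 then nzProd t else nzProd t * i := by
  induction t with
  | nil => by_cases hi : i = 0 <;> simp [nzProd, hi]
  | cons x s ih =>
    simp only [List.cons_append, nzProd]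
    rw [ih]
    by_cases hx : x = 0 <;> by_cases hi : i = 0 <;> simp [hx, hi] <;> ring

theorem zCount_append (t : List Int) (i : Int) :
    zCount (t ++ [i]) = if i = 0 then zCount t + 1 else zCount t := by
  induction t with
  | nil => by_cases hi : i = 0 <;> simp [zCount, hi]
  | cons x s ih =>
    simp only [List.cons_append, zCount]
    rw [ih]
    by_cases hx : x = 0 <;> by_cases hi : i = 0 <;> simp [hx, hi]

theorem floordiv_mul_cancel_left (a b : Int) (h : a ≠ 0) :
    PySem.Int.floordiv (a * b) a = b := by
  simp [PySem.Int.floordiv]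
  exact Int.mul_fdiv_cancel_left b h

-- A's loop never looks at fuel/condition again once the condition fails
theorem rowLoop_stop (row : List Int) (l : Int) (f : Nat) (s m : Int)
    (h : ¬ s + l ≤ (row.length : Int)) : rowProductLoop row l f s m = m := by
  cases f <;> simp [rowProductLoop, h]

theorem getProduct_window (u w rest : List Int) :
    getProduct (u ++ w ++ rest) (u.length : Int) ((u.length : Int) + (w.length : Int)) = listProd w := by
  rw [getProduct, PySem.List.slice_natCast_add]
  rw [List.append_assoc, List.drop_left, List.take_left]
  rw [foldl_mul_eq]; ring

theorem getProduct_self (row : List Int) (s : Nat) :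
    getProduct row (s : Int) ((s : Int) + 0) = 1 := by
  rw [getProduct]
  rw [show ((s : Int) + 0) = (s : Int) by ring]
  rw [PySem.List.slice_natCast]
  simp

-- A's loop, in goC form (window length ≥ 1)
theorem rowLoopA (l : Int) (hl : 1 ≤ l) :
    ∀ (rest u w : List Int) (m : Int) (f : Nat), (w.length : Int) = l →
      rest.length + 1 ≤ f →
      rowProductLoop (u ++ w ++ rest) l f (u.length : Int) m = goC w rest (max m (listProd w)) := by
  intro rest
  induction rest with
  | nil =>
    intro u w m f hw hf
    obtain ⟨f', rfl⟩ : ∃ f', f = f' + 1 := ⟨f - 1, by omega⟩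
    rw [rowProductLoop]
    rw [if_pos (by simp [← hw]; try omega)]
    rw [show ((u.length : Int) + l) = (u.length : Int) + (w.length : Int) by rw [hw]]
    rw [getProduct_window, ifmax]
    rw [rowLoop_stop _ _ _ _ _ (by simp [← hw]; try omega)]
    simp [goC]
  | cons i rest' ih =>
    intro u w m f hw hf
    obtain ⟨f', rfl⟩ : ∃ f', f = f' + 1 := ⟨f - 1, by omega⟩
    obtain ⟨h, t, rfl⟩ : ∃ h t, w = h :: t := by
      cases w with
      | nil => simp at hw; omega
      | cons a b => exact ⟨a, b, rfl⟩
    have hwl : l = (t.length : Int) + 1 := by simp at hw; omega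
    rw [rowProductLoop]
    rw [if_pos (by simp [hwl]; try omega)]
    rw [show ((u.length : Int) + l) = (u.length : Int) + ((h :: t).length : Int) by rw [hw]]
    rw [getProduct_window, ifmax]
    have heq : u ++ (h :: t) ++ (i :: rest') = (u ++ [h]) ++ (t ++ [i]) ++ rest' := by simp
    have hlen : ((u ++ [h]).length : Int) = (u.length : Int) + 1 := by simp
    rw [heq, ← hlen]
    have hw' : ((t ++ [i]).length : Int) = l := by simp [hwl]
    rw [ih (u ++ [h]) (t ++ [i]) (max m (listProd (h :: t))) f' hw' (by simp at hf ⊢; omega)]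
    simp [goC]

-- B's slide loop, in goC form
theorem slideB :
    ∀ (rest w : List Int) (best : Int), w ≠ [] →
      ((List.zip (w ++ rest) rest).foldl slideStep (nzProd w, zCount w, best)).2.2 =
        goC w rest best := by
  intro rest
  induction rest with
  | nil => intro w best hw; simp [goC]
  | cons i rest' ih =>
    intro w best hw
    obtain ⟨h, t, rfl⟩ : ∃ h t, w = h :: t := by
      cases w with | nil => exact absurd rfl hw | cons a b => exact ⟨a, b, rfl⟩
    have hzip : List.zip ((h :: t) ++ (i :: rest')) (i :: rest') =
        (h, i) :: List.zip ((t ++ [i]) ++ rest') rest' := by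
      simp [List.zip]
    rw [hzip, List.foldl_cons]
    have hstep : slideStep (nzProd (h :: t), zCount (h :: t), best) (h, i) =
        (nzProd (t ++ [i]), zCount (t ++ [i]), max best (listProd (t ++ [i]))) := by
      simp only [slideStep, nzProd, zCount, nzProd_append, zCount_append]
      by_cases hh : h = 0 <;> by_cases hi : i = 0 <;>
        simp [hh, hi, listProd_eq, zCount_append, nzProd_append, ifmax] <;>
        [skip; rw [mul_assoc]] <;>
        rw [floordiv_mul_cancel_left _ _ hh] <;> simp
    rw [hstep, ih (t ++ [i]) _ (by simp)]
    simp [goC]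

-- B's initial-window fold computes (nzProd, zCount)
theorem initFold (w : List Int) : ∀ (p z : Int),
    w.foldl (fun (pz : Int × Int) x => if x = 0 then (pz.1, pz.2 + 1) else (pz.1 * x, pz.2)) (p, z)
      = (p * nzProd w, z + zCount w) := by
  induction w with
  | nil => intro p z; simp [nzProd, zCount]
  | cons x t ih => intro p z; by_cases hx : x = 0 <;>
      simp [List.foldl, hx, ih, nzProd, zCount, mul_assoc] <;> ring_nf

-- A's loop for window length 0 from any start s ≤ n
theorem rowLoopA0 (row : List Int) :
    ∀ (f : Nat) (s : Nat) (m : Int), s ≤ row.length → row.length - s + 1 ≤ f →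
      rowProductLoop row 0 f (s : Int) m = max m 1 := by
  intro f
  induction f with
  | zero => intro s m hs hf; omega
  | succ f' ih =>
    intro s m hs hf
    rw [rowProductLoop]
    rw [if_pos (by push_cast; omega)]
    rw [getProduct_self, ifmax]
    by_cases hlt : s < row.length
    · rw [show ((s : Int) + 1) = ((s + 1 : Nat) : Int) by push_cast; ring]
      rw [ih (s + 1) _ (by omega) (by omega)]
      rw [max_assoc, max_self]
    · have hs' : s = row.length := by omega
      rw [rowLoop_stop _ _ _ _ _ (by push_cast; omega)]

-- B's slide loop for window length 0 (pairs out = inc) keeps the state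
theorem slideB0 : ∀ (u : List Int) (b : Int), 1 ≤ b →
    ((List.zip u u).foldl slideStep (1, 0, b)).2.2 = b := by
  intro u
  induction u with
  | nil => intro b hb; simp
  | cons x t ih =>
    intro b hb
    rw [List.zip_cons_cons, List.foldl_cons]
    have hstep : slideStep (1, 0, b) (x, x) = (1, 0, b) := by
      by_cases hx : x = 0
      · simp [slideStep, hx]; omega
      · have hd : PySem.Int.floordiv ((1 : Int) * x) x = 1 := by
          rw [show ((1 : Int) * x) = x * 1 by ring]
          exact floordiv_mul_cancel_left _ _ hx
        rw [one_mul] at hd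
        simp [slideStep, hx, hd]
        omega
    rw [hstep, ih b hb]

-- per-row agreement for 0 ≤ l
theorem perRow (l : Int) (hl : 0 ≤ l) (row : List Int) (b : Int) :
    rowProductLoop row l ((row.length : Int) - l + 1).toNat 0 b =
      (if l > (row.length : Int) then b
        else
          let pz := (PySem.List.slice row none (some l)).foldl
            (fun (pz : Int × Int) x => if x = 0 then (pz.1, pz.2 + 1) else (pz.1 * x, pz.2)) (1, 0)
          let cand : Int := if pz.2 = 0 then pz.1 else 0
          let best1 : Int := if cand > b then cand else b
          ((row.zip (PySem.List.slice row (some l) none)).foldl slideStep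
            (pz.1, pz.2, best1)).2.2) := by
  by_cases hbig : l > (row.length : Int)
  · rw [if_pos hbig]
    rw [show ((row.length : Int) - l + 1).toNat = 0 by omega]
    rfl
  · rw [if_neg hbig]
    have hto : PySem.List.slice row none (some l) = row.take l.toNat :=
      PySem.List.slice_to row hl
    have hfrom : PySem.List.slice row (some l) none = row.drop l.toNat :=
      PySem.List.slice_from row hl
    have hwl : (row.take l.toNat).length = l.toNat := by
      simp; omega
    rw [hto, hfrom, initFold]
    simp only [one_mul, zero_add]
    by_cases h0 : l = 0
    · subst h0
      rw [show ((row.length : Int) - 0 + 1).toNat = row.length + 1 by omega]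
      have h00 := rowLoopA0 row (row.length + 1) 0 b (by omega) (by omega)
      push_cast at h00
      rw [h00]
      simp only [Int.toNat_zero, List.take_zero, List.drop_zero, nzProd, zCount,
        if_true, ifmax]
      exact (slideB0 row (max b 1) (by omega)).symm
    · have hl1 : 1 ≤ l := by omega
      have hsplit : row = [] ++ row.take l.toNat ++ row.drop l.toNat := by simp
      have hwlen : ((row.take l.toNat).length : Int) = l := by rw [hwl]; omega
      calc rowProductLoop row l ((row.length : Int) - l + 1).toNat 0 b
          = rowProductLoop ([] ++ row.take l.toNat ++ row.drop l.toNat) l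
              ((row.length : Int) - l + 1).toNat (((List.nil (α := Int)).length : Int)) b := by
            rw [← hsplit]; rfl
        _ = goC (row.take l.toNat) (row.drop l.toNat) (max b (listProd (row.take l.toNat))) := by
            apply rowLoopA l hl1
            · exact hwlen
            · simp; omega
        _ = _ := by
            rw [← listProd_eq, ifmax]
            have hzip : row.zip (row.drop l.toNat) =
                (row.take l.toNat ++ row.drop l.toNat).zip (row.drop l.toNat) := by
              rw [List.take_append_drop]
            rw [hzip]
            rw [slideB (row.drop l.toNat) (row.take l.toNat) _
              (by intro hnil; rw [← List.length_eq_zero_iff] at hnil; omega)]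

-- A's result is at least its accumulator
theorem rowLoop_ge (row : List Int) (l : Int) :
    ∀ (f : Nat) (s m : Int), m ≤ rowProductLoop row l f s m := by
  intro f
  induction f with
  | zero => intro s m; simp [rowProductLoop]
  | succ f ih =>
    intro s m
    by_cases h : s + l ≤ (row.length : Int)
    · rw [rowProductLoop, if_pos h]
      refine le_trans ?_ (ih (s + 1) _)
      by_cases hp : getProduct row s (s + l) > m <;> simp [hp] <;> omega
    · rw [rowLoop_stop _ _ _ _ _ h]

-- with a negative window length A's loop reaches the empty slice at s = n, so its result is ≥ 1
theorem rowLoop_one (row : List Int) (l : Int) (hl : l < 0) :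
    ∀ (f : Nat) (s : Nat) (m : Int), s ≤ row.length → row.length - s + 1 ≤ f →
      1 ≤ rowProductLoop row l f (s : Int) m := by
  intro f
  induction f with
  | zero => intro s m hs hf; omega
  | succ f' ih =>
    intro s m hs hf
    rw [rowProductLoop, if_pos (by push_cast; omega)]
    by_cases hlt : s < row.length
    · rw [show ((s : Int) + 1) = ((s + 1 : Nat) : Int) by push_cast; ring]
      exact ih (s + 1) _ (by omega) (by omega)
    · have hs' : s = row.length := by omega
      subst hs'
      have hnil : PySem.List.slice row (some (row.length : Int))
          (some ((row.length : Int) + l)) = [] := by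
        apply List.eq_nil_of_length_eq_zero
        rw [PySem.List.length_slice]
        have h1 : PySem.List.clampIdx row.length ((row.length : Int)) = row.length := by
          rw [PySem.List.clampIdx_natCast]; omega
        have h2 := PySem.List.clampIdx_le row.length ((row.length : Int) + l)
        omega
      have hp : getProduct row ((row.length : Nat) : Int) (((row.length : Nat) : Int) + l) = 1 := by
        rw [getProduct, hnil]; rfl
      rw [hp]
      refine le_trans ?_ (rowLoop_ge row l f' _ _)
      by_cases h1 : (1 : Int) > m <;> simp [h1] <;> omega

theorem foldl_rows_ge (l : Int) :
    ∀ (rows : List (List Int)) (m : Int),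
      m ≤ rows.foldl (fun maxProduct row =>
        rowProductLoop row l ((row.length : Int) - l + 1).toNat 0 maxProduct) m := by
  intro rows
  induction rows with
  | nil => intro m; simp
  | cons r rs ih =>
    intro m
    rw [List.foldl_cons]
    exact le_trans (rowLoop_ge r l _ 0 m) (ih _)

-- ===== VERDICT (by name: the statement is the Claim_ definition above) =====
theorem rowProduct_spec : Claim_unchanged_rowProduct := by
  intro matrix length _ hnd
  unfold rowProduct rowProduct_alt
  by_cases hneg : length < 0
  · have hm : matrix = [] := by
      by_contra hne
      exact (hnd ⟨hneg, hne⟩).elim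
    subst hm
    simp [hneg]
  · rw [if_neg hneg]
    apply PySem.List.foldl_congr_mem
    intro acc row _
    exact perRow length (by omega) row acc

theorem rowProduct_changed : Claim_changed_rowProduct := by
  unfold Claim_changed_rowProduct; decide

theorem rowProduct_tight : Claim_exact_rowProduct := by
  intro matrix length _ hD
  obtain ⟨hneg, hne⟩ := hD
  have halt : rowProduct_alt matrix length = 0 := by
    unfold rowProduct_alt; rw [if_pos hneg]
  rw [halt]
  obtain ⟨r, rs, rfl⟩ : ∃ r rs, matrix = r :: rs := by
    cases matrix with
    | nil => exact absurd rfl hne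
    | cons a b => exact ⟨a, b, rfl⟩
  have h1 : (1 : Int) ≤ rowProduct (r :: rs) length := by
    unfold rowProduct
    rw [List.foldl_cons]
    refine le_trans ?_ (foldl_rows_ge length rs _)
    have hf := rowLoop_one r length hneg ((r.length : Int) - length + 1).toNat 0 0
      (by omega) (by omega)
    push_cast at hf
    exact hf
  omega
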